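-- pv_equiv track=rewrite | github.com/MauriceCalvert/andante | motifs/subject_generator.py | _has_isolated_semiquaver
-- ===== SOURCE A (Python) =====
-- SEMIQUAVER_DI: int = 0
--
-- def _has_isolated_semiquaver(fill: tuple[int, ...]) -> bool:
--     """True if any semiquaver has no adjacent semiquaver neighbour."""
--     for i, d in enumerate(fill):
--         if d == SEMIQUAVER_DI:
--             prev_sq = i > 0 and fill[i - 1] == SEMIQUAVER_DI
--             next_sq = i < len(fill) - 1 and fill[i + 1] == SEMIQUAVER_DI
--             if not prev_sq and not next_sq:
--                 return True
--     return False
-- ===== SOURCE B (Python) =====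
-- from itertools import groupby
--
-- SEMIQUAVER_DI: int = 0
--
-- def _has_isolated_semiquaver(fill: tuple[int, ...]) -> bool:
--     """True if any semiquaver has no adjacent semiquaver neighbour."""
--     return any(v == SEMIQUAVER_DI and sum(1 for _ in g) == 1
--                for v, g in groupby(fill))
-- ===== Notes on version B (the rewrite author's own statement) =====
-- stated objective: idiomatic
-- what changed: Replaces the per-index prev/next neighbour inspection with itertools.groupby: collapse the list into maximal runs of equal values and report whether any semiquaver run has length exactly 1.
import Mathlib
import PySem

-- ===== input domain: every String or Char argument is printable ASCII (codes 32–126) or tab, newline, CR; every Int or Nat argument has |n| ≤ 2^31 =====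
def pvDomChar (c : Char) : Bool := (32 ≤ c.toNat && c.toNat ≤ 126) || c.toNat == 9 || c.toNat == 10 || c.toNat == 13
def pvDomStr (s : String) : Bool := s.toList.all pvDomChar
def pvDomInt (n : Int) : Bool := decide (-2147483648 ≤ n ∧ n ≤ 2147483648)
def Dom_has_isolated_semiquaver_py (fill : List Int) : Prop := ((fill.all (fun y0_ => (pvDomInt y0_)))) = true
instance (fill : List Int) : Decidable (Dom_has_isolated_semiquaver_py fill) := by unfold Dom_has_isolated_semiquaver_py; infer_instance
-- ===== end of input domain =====

-- B: replaces per-index prev/next neighbour checks with a groupby-style run-length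
-- collapse (idiomatic decomposition; same O(n) cost; return value only).
-- ===== PORT A =====
def SEMIQUAVER_DI : Int := 0

-- the Python for-loop over enumerate(fill), carrying the previous element
-- (= fill[i-1] when i > 0) while the tail's head is fill[i+1]
def pvGoA (prev : Option Int) : List Int → Bool
  | [] => false
  | d :: rest =>
    if d = SEMIQUAVER_DI then
      let prev_sq : Bool := prev == some SEMIQUAVER_DI
      let next_sq : Bool := rest.head? == some SEMIQUAVER_DI
      if !prev_sq && !next_sq then true else pvGoA (some d) rest
    else pvGoA (some d) rest

def has_isolated_semiquaver_py (fill : List Int) : Bool := pvGoA none fill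

-- ===== PORT B =====
-- itertools.groupby: maximal runs of equal consecutive values with their lengths
def pvRunGroups (v : Int) (n : Nat) : List Int → List (Int × Nat)
  | [] => [(v, n)]
  | x :: xs => if x = v then pvRunGroups v (n + 1) xs else (v, n) :: pvRunGroups x 1 xs

def has_isolated_semiquaver_py_alt : List Int → Bool
  | [] => false
  | x :: xs => (pvRunGroups x 1 xs).any (fun p => p.1 == SEMIQUAVER_DI && p.2 == 1)

-- ===== PRECONDITION & SPEC =====
def Spec_has_isolated_semiquaver_py (fill : List Int) (out : Bool) : Prop := out = has_isolated_semiquaver_py_alt fill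
instance (fill : List Int) (out : Bool) : Decidable (Spec_has_isolated_semiquaver_py fill out) := by unfold Spec_has_isolated_semiquaver_py; infer_instance

-- ===== CLAIM (what is proved, stated in full; the proofs are below) =====
def Claim_equal_has_isolated_semiquaver_py : Prop := ∀ (fill : List Int), Dom_has_isolated_semiquaver_py fill → Spec_has_isolated_semiquaver_py fill (has_isolated_semiquaver_py fill)

-- ===== LEMMAS AND PROOFS =====
-- key invariant: the pending run (v, n) (n ≥ 1) plus the rest of the scan
theorem pvKey (xs : List Int) (v : Int) (n : Nat) (hn : 1 ≤ n) :
    (pvRunGroups v n xs).any (fun p => p.1 == SEMIQUAVER_DI && p.2 == 1)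
      = ((v == 0 && n == 1 && !(xs.head? == some (0:Int))) || pvGoA (some v) xs) := by
  induction xs generalizing v n with
  | nil => simp [pvRunGroups, pvGoA, SEMIQUAVER_DI]
  | cons x t ih =>
    simp only [pvRunGroups]
    by_cases hxv : x = v
    · subst hxv
      rw [if_pos rfl, ih x (n + 1) (by omega)]
      have hn1 : ((n + 1 : Nat) == 1) = false := by simp; omega
      by_cases hx : x = 0
      · subst hx
        simp [pvGoA, SEMIQUAVER_DI, hn1]
      · simp [pvGoA, SEMIQUAVER_DI, hx, hn1]
    · rw [if_neg hxv]
      simp only [List.any_cons, ih x 1 (le_refl 1)]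
      by_cases hx : x = 0
      · subst hx
        have hv0 : v ≠ 0 := fun h => hxv h.symm
        cases hb : (t.head? == some (0 : Int)) <;>
          simp [pvGoA, SEMIQUAVER_DI, hv0, hb]
      · have hx' : (x == (0 : Int)) = false := by simp [hx]
        by_cases hv : v = 0
        · subst hv; simp [pvGoA, SEMIQUAVER_DI, hx, hx']
        · simp [pvGoA, SEMIQUAVER_DI, hx, hx', hv]


-- ===== VERDICT (by name: the statement is the Claim_ definition above) =====
theorem has_isolated_semiquaver_py_spec : Claim_equal_has_isolated_semiquaver_py := by
  intro fill _
  unfold Spec_has_isolated_semiquaver_py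
  cases fill with
  | nil => rfl
  | cons x xs =>
    simp only [has_isolated_semiquaver_py, has_isolated_semiquaver_py_alt]
    rw [pvKey xs x 1 (le_refl 1)]
    by_cases hx : x = 0
    · subst hx
      cases hb : (xs.head? == some (0 : Int)) <;>
        simp [pvGoA, SEMIQUAVER_DI, hb]
    · simp [hx, pvGoA, SEMIQUAVER_DI]
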